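-- pv_equiv track=rewrite | github.com/f3rnando3669/Latin-lexicon-ML-Research | MachineLearningSummer/fallacy_dataset/addmore_rulebook_examples.py | get_limited_labels_and_articles
-- ===== SOURCE A (Python) =====
-- def get_limited_labels_and_articles(tags, labels_and_articles, limit=1):
--     tag_to_article = {tag:[] for tag in tags}
--     for tag, article in labels_and_articles:
--         if tag in tags:
--             if len(tag_to_article[tag]) == limit:
--                 continue
--             tag_to_article[tag].append(article)
--     return tag_to_article
-- ===== SOURCE B (Python) =====
-- def get_limited_labels_and_articles(tags, labels_and_articles, limit=1):
--     result = {}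
--     for tag in tags:
--         collected = []
--         for t, article in labels_and_articles:
--             if len(collected) == limit:
--                 break
--             if t == tag:
--                 collected.append(article)
--         result[tag] = collected
--     return result
-- ===== Notes on version B (the rewrite author's own statement) =====
-- stated objective: alternative
-- what changed: Replaces A's single pass over the pair list with dict lookups/caps by a per-tag outer loop that rescans the pair list and breaks early once the cap is reached; no dict is consulted during collection.
import Mathlib
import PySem

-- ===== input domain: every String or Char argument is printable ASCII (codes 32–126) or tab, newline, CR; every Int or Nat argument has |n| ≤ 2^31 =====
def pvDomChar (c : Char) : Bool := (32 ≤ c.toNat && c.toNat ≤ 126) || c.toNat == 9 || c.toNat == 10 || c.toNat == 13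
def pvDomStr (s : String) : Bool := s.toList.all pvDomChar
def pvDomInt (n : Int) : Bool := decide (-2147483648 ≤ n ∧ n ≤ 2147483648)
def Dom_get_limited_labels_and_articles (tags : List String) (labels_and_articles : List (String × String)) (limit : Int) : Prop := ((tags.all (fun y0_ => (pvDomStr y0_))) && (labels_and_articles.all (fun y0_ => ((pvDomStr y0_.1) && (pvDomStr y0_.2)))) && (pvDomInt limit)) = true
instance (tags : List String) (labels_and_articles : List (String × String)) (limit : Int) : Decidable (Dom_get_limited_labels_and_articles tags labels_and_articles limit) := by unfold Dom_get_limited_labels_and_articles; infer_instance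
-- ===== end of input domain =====

-- B replaces A's single pass + dict-lookup cap by a per-tag rescan of the pair list with an
-- early break at the cap (alternative decomposition, same results).

-- ===== PORT A =====
-- one step of A's 'for tag, article in labels_and_articles' loop
def pvStepA (tags : List String) (limit : Int) (d : PySem.Dict String (List String)) (p : String × String) : PySem.Dict String (List String) :=
  if tags.contains p.1 then
    if ((d.getD p.1 []).length : Int) = limit then d
    else d.modify p.1 [] (fun xs => xs ++ [p.2])
  else d

def get_limited_labels_and_articles (tags : List String) (labels_and_articles : List (String × String)) (limit : Int) : List (String × List String) :=
  let tag_to_article : PySem.Dict String (List String) :=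
    tags.foldl (fun d tag => d.insert tag []) PySem.Dict.empty
  (labels_and_articles.foldl (pvStepA tags limit) tag_to_article).items

-- ===== PORT B =====
-- inner loop of B: scan the pair list, appending matches, breaking once the cap is hit
def pvCollect (pairs : List (String × String)) (tag : String) (limit : Int) (acc : List String) : List String :=
  match pairs with
  | [] => acc
  | p :: rest =>
    if (acc.length : Int) = limit then acc
    else if p.1 == tag then pvCollect rest tag limit (acc ++ [p.2])
    else pvCollect rest tag limit acc

def get_limited_labels_and_articles_alt (tags : List String) (labels_and_articles : List (String × String)) (limit : Int) : List (String × List String) :=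
  (tags.foldl (fun d tag => d.insert tag (pvCollect labels_and_articles tag limit [])) PySem.Dict.empty).items

-- ===== PRECONDITION & SPEC =====
def Spec_get_limited_labels_and_articles (tags : List String) (labels_and_articles : List (String × String)) (limit : Int) (out : List (String × List String)) : Prop := out = get_limited_labels_and_articles_alt tags labels_and_articles limit
instance (tags : List String) (labels_and_articles : List (String × String)) (limit : Int) (out : List (String × List String)) : Decidable (Spec_get_limited_labels_and_articles tags labels_and_articles limit out) := by unfold Spec_get_limited_labels_and_articles; infer_instance

-- ===== CLAIM (what is proved, stated in full; the proofs are below) =====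
def Claim_equal_get_limited_labels_and_articles : Prop := ∀ (tags : List String) (labels_and_articles : List (String × String)) (limit : Int), Dom_get_limited_labels_and_articles tags labels_and_articles limit → Spec_get_limited_labels_and_articles tags labels_and_articles limit (get_limited_labels_and_articles tags labels_and_articles limit)

-- ===== LEMMAS AND PROOFS =====

-- the canonical capped accumulator both programs compute per tag
def pvCap (limit : Int) (acc : List String) (arts : List String) : List String :=
  arts.foldl (fun acc a => if (acc.length : Int) = limit then acc else acc ++ [a]) acc

def pvMatches (pairs : List (String × String)) (c : String) : List String :=
  pairs.filterMap (fun p => if p.1 = c then some p.2 else none)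

theorem pvCap_fixed (limit : Int) (acc : List String) (arts : List String)
    (h : (acc.length : Int) = limit) : pvCap limit acc arts = acc := by
  induction arts with
  | nil => rfl
  | cons a rest ih => simp [pvCap, List.foldl, h] at *; exact ih

theorem pvCollect_eq_cap (pairs : List (String × String)) (tag : String) (limit : Int)
    (acc : List String) : pvCollect pairs tag limit acc = pvCap limit acc (pvMatches pairs tag) := by
  induction pairs generalizing acc with
  | nil => rfl
  | cons p rest ih =>
    by_cases hl : (acc.length : Int) = limit
    · rw [pvCollect, if_pos hl, pvCap_fixed limit acc _ hl]
    · rw [pvCollect, if_neg hl]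
      by_cases hm : p.1 = tag
      · simp only [hm, beq_self_eq_true, if_true]
        simp only [pvMatches, List.filterMap_cons, if_pos hm]
        simp only [pvCap, List.foldl_cons, if_neg hl]
        exact ih (acc ++ [p.2])
      · have hb : (p.1 == tag) = false := by simp [hm]
        simp only [hb, Bool.false_eq_true, if_false]
        simp only [pvMatches, List.filterMap_cons, if_neg hm]
        exact ih acc

-- A's fold at an existing key computes the same capped accumulator
theorem pvStepA_getD (tags : List String) (limit : Int)
    (pairs : List (String × String)) (d : PySem.Dict String (List String)) (c : String)
    (hc : tags.contains c = true) :
    (pairs.foldl (pvStepA tags limit) d).getD c [] = pvCap limit (d.getD c []) (pvMatches pairs c) := by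
  induction pairs generalizing d with
  | nil => rfl
  | cons p rest ih =>
    rw [List.foldl_cons]
    by_cases hm : p.1 = c
    · subst hm
      rw [pvStepA, if_pos hc]
      by_cases hl : ((d.getD p.1 []).length : Int) = limit
      · rw [if_pos hl, ih d]
        simp [pvMatches, pvCap, hl]
      · rw [if_neg hl, ih]
        simp [pvMatches, pvCap, hl, PySem.Dict.getD_modify_self]
    · have h1 : (rest.foldl (pvStepA tags limit) (pvStepA tags limit d p)).getD c []
          = pvCap limit ((pvStepA tags limit d p).getD c []) (pvMatches rest c) := ih _
      have h2 : (pvStepA tags limit d p).getD c [] = d.getD c [] := by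
        unfold pvStepA
        split_ifs with h h'
        · rfl
        · exact PySem.Dict.getD_modify_of_ne d [] _ (fun h => hm h.symm)
        · rfl
      rw [h1, h2]
      simp [pvMatches, hm]

-- A's fold preserves the key list
theorem pvStepA_keys (tags : List String) (limit : Int)
    (pairs : List (String × String)) (d : PySem.Dict String (List String))
    (hk : ∀ t, tags.contains t = true → d.contains t = true) :
    (pairs.foldl (pvStepA tags limit) d).keys = d.keys := by
  induction pairs generalizing d with
  | nil => rfl
  | cons p rest ih =>
    rw [List.foldl_cons]
    have hkeys : (pvStepA tags limit d p).keys = d.keys := by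
      unfold pvStepA
      split_ifs with h h'
      · rfl
      · rw [PySem.Dict.keys_modify]
        exact PySem.Dict.keys_insert_of_contains d _ (hk p.1 h)
      · rfl
    have hcont : ∀ t, tags.contains t = true → (pvStepA tags limit d p).contains t = true := by
      intro t ht
      rw [PySem.Dict.contains_iff_mem_keys] at *
      · rw [hkeys]; exact (PySem.Dict.contains_iff_mem_keys d t).mp (hk t ht)
    rw [ih _ hcont, hkeys]

-- lookup in a fold of inserts whose value depends only on the key
theorem pvFoldIns_getD (ts : List String) (g : String → List String)
    (d : PySem.Dict String (List String)) (c : String) :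
    (ts.foldl (fun d t => d.insert t (g t)) d).getD c []
      = if c ∈ ts then g c else d.getD c [] := by
  induction ts generalizing d with
  | nil => simp
  | cons t rest ih =>
    rw [List.foldl_cons, ih]
    by_cases h : c ∈ rest
    · simp [h]
    · by_cases he : c = t
      · subst he; simp [h, PySem.Dict.getD_insert_self]
      · rw [if_neg h, PySem.Dict.getD_insert_of_ne d (g t) [] he]
        simp [h, he]

theorem pvFoldIns_keys (ts : List String) (g : String → List String) :
    (ts.foldl (fun d t => d.insert t (g t)) PySem.Dict.empty).keys = PySem.Set.ofList ts := by
  rw [PySem.Dict.keys_foldl_insert]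
  exact PySem.Set.update_empty ts

-- ===== VERDICT (by name: the statement is the Claim_ definition above) =====
theorem get_limited_labels_and_articles_spec : Claim_equal_get_limited_labels_and_articles := by
  intro tags pairs limit _
  unfold Spec_get_limited_labels_and_articles
  unfold get_limited_labels_and_articles get_limited_labels_and_articles_alt
  set d0 := tags.foldl (fun d tag => d.insert tag []) PySem.Dict.empty with hd0
  set dA := pairs.foldl (pvStepA tags limit) d0 with hdA
  set dB := tags.foldl (fun d tag => d.insert tag (pvCollect pairs tag limit [])) PySem.Dict.empty with hdB
  have hk0 : d0.keys = PySem.Set.ofList tags := pvFoldIns_keys tags (fun _ => [])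
  have hkA : dA.keys = PySem.Set.ofList tags := by
    rw [hdA, pvStepA_keys tags limit pairs d0, hk0]
    intro t ht
    rw [PySem.Dict.contains_iff_mem_keys, hk0]
    exact (PySem.Set.mem_ofList tags t).mpr (by simpa using ht)
  have hkB : dB.keys = PySem.Set.ofList tags := pvFoldIns_keys tags _
  have hndA : dA.keys.Nodup := by rw [hkA]; exact PySem.Set.nodup_ofList tags
  have hndB : dB.keys.Nodup := by rw [hkB]; exact PySem.Set.nodup_ofList tags
  rw [PySem.Dict.items_eq_map_keys dA hndA [], PySem.Dict.items_eq_map_keys dB hndB [],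
    hkA, hkB]
  apply List.map_congr_left
  intro c hc
  have hctags : c ∈ tags := (PySem.Set.mem_ofList tags c).mp hc
  have hcont : tags.contains c = true := by simpa using hctags
  have hA : dA.getD c [] = pvCap limit (d0.getD c []) (pvMatches pairs c) :=
    pvStepA_getD tags limit pairs d0 c hcont
  have h0 : d0.getD c [] = [] := by
    rw [hd0, pvFoldIns_getD tags (fun _ => []) PySem.Dict.empty c]
    simp [hctags]
  have hB : dB.getD c [] = pvCollect pairs c limit [] := by
    rw [hdB, pvFoldIns_getD tags _ PySem.Dict.empty c]
    simp [hctags]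
  rw [hA, h0, hB, pvCollect_eq_cap]
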